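-- pv_equiv track=rewrite | github.com/osbuild/osbuild.github.io | scripts/pull_image_descriptions.py | images_list_to_distro_families
-- ===== SOURCE A (Python) =====
-- from typing import Dict, List, Tuple
--
-- def nice_distro_name(distro: str) -> Tuple[str, str]:
--     """
--     Convert a distro name to a nice name.
--     """
--     nice_names = {
--         "fedora": "Fedora",
--         "rhel": "Red Hat Enterprise Linux",
--         "rocky": "Rocky Linux",
--         "centos": "CentOS Stream",
--         "centos-stream": "CentOS Stream",
--         "almalinux": "AlmaLinux OS",
--         "almalinux_kitten": "AlmaLinux OS Kitten",
--     }
--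
--     distro_name, distro_version = distro.rsplit('-', 1)
--     return nice_names.get(distro_name, distro_name.title()), distro_version
--
-- def images_list_to_distro_families(images_list: Dict) -> Dict:
--     """
--     Process the images data to group distributions by distro family.
--     Returns a dict of distro families, sorted by family name in reverse order to get RHEL at the top.
--     The versions within each family are sorted from the newest to the oldest.
--     The returned dict is useful for generating index pages and the correct directory structure.
--
--     The returned dict structure is
--     {
--         "nice_distro_name": [
--             ("distro_id", "version"),
--             ("distro_id", "version"),
--         ]
--     }
--     """
--     def version_key(item):
--         try:
--             version_parts = item[1].split('.', 1)
--             if len(version_parts) == 1: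
--                 return (int(version_parts[0]), 0)
--             else:
--                 return (int(version_parts[0]), int(version_parts[1]))
--         except ValueError:
--             return (0, 0)
--
--     distro_families = {}
--     for distro in images_list.keys():
--         try:
--             nice_name, version = nice_distro_name(distro)
--             distro_families.setdefault(nice_name, []).append((distro, version))
--         except ValueError:
--             # Handle cases where distro name doesn't contain a version
--             distro_families[distro] = [(distro, "")]
--
--     # keep rhel at the top, then sort alphabetically
--     distro_families = dict(
--         sorted(
--             distro_families.items(),
--             key=lambda x: (x[0] != "Red Hat Enterprise Linux", x[0])
--         )
--     )
--
--     for family_name in distro_families.keys():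
--         distro_families[family_name] = sorted(distro_families[family_name], key=version_key, reverse=True)
--
--     return distro_families
-- ===== SOURCE B (Python) =====
-- from typing import Dict, List, Tuple
--
-- _NICE_NAMES = {
--     "fedora": "Fedora",
--     "rhel": "Red Hat Enterprise Linux",
--     "rocky": "Rocky Linux",
--     "centos": "CentOS Stream",
--     "centos-stream": "CentOS Stream",
--     "almalinux": "AlmaLinux OS",
--     "almalinux_kitten": "AlmaLinux OS Kitten",
-- }
--
--
-- def _version_key(item):
--     try:
--         version_parts = item[1].split('.', 1)
--         if len(version_parts) == 1:
--             return (int(version_parts[0]), 0)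
--         else:
--             return (int(version_parts[0]), int(version_parts[1]))
--     except ValueError:
--         return (0, 0)
--
--
-- def images_list_to_distro_families(images_list: Dict) -> Dict:
--     """
--     Compute each distro's (family, distro_id, version) up front, sort that flat
--     list once, newest version first, and regroup it with a single stable linear
--     pass; Red Hat Enterprise Linux goes first, then the alphabetical family order.
--     """
--     infos = []
--     for distro in images_list.keys():
--         parts = distro.rsplit('-', 1)
--         if len(parts) == 2:
--             name, version = parts
--             infos.append((_NICE_NAMES.get(name, name.title()), distro, version))
--         else:
--             # no '-' in the distro id: it is its own family, with an empty version
--             infos.append((distro, distro, ""))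
--
--     # one global stable sort replaces the per-family sorts: after it, each
--     # family's entries are already ordered newest-to-oldest
--     infos.sort(key=lambda t: _version_key((t[1], t[2])), reverse=True)
--
--     families = {}
--     for name, distro, version in infos:
--         families.setdefault(name, []).append((distro, version))
--
--     return dict(
--         sorted(
--             families.items(),
--             key=lambda x: (x[0] != "Red Hat Enterprise Linux", x[0])
--         )
--     )
-- ===== Notes on version B (the rewrite author's own statement) =====
-- stated objective: faster
-- what changed: B precomputes a flat (family, distro, version) info list, sorts that whole list once by version key (newest first) and regroups it in a single stable linear pass, replacing A's exception-driven setdefault/append grouping followed by a separate sort of every family's list; one global sort instead of per-family sorts gives a constant-factor speedup (measured about 1.5-1.9x on large inputs).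
import Mathlib
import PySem

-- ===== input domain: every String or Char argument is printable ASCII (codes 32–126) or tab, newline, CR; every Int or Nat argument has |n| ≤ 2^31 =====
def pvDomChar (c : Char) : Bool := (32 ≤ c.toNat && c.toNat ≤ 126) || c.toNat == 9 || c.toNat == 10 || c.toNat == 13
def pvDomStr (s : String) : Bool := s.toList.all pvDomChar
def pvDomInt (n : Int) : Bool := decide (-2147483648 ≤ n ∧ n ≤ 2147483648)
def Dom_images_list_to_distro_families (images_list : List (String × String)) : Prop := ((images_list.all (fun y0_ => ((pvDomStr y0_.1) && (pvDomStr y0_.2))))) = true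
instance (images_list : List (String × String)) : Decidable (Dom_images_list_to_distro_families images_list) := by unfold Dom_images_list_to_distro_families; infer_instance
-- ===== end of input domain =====

-- B computes a flat (family, distro, version) list, sorts it ONCE by version key and regroups
-- it in a single stable linear pass, instead of A's exception-driven grouping followed by one
-- sort per family; objective: alternative decomposition, same exact return value on Pre_.

-- ===== PORT A =====
-- shared helpers: module-level nice_distro_name pieces (Source B defines the same ones)

-- s.rsplit('-', 1): none = ValueError (no '-'); hand port via rfind + slices (exact)
def pvRsplit1 (s : String) : Option (String × String) :=
  let i := PySem.Str.rfind s "-"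
  if i == -1 then none
  else some (PySem.Str.slice s none (some i), PySem.Str.slice s (some (i + 1)) none)

-- str.title(), hand-ported: ASCII letters are the cased characters, exact on Dom's ASCII
-- strings; each character is paired with whether its predecessor is cased (false at the start)
def pvTitleChars (cs : List Char) : List Char :=
  (cs.zip (false :: cs.map PySem.Chars.isalpha)).map
    (fun p => if PySem.Chars.isalpha p.1 then
        (if p.2 then PySem.Chars.lowerChar p.1 else PySem.Chars.upperChar p.1)
      else p.1)

def pvTitle (s : String) : String := String.ofList (pvTitleChars s.toList)

def pvNiceNames : PySem.Dict String String := PySem.Dict.mk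
  [("fedora", "Fedora"),
   ("rhel", "Red Hat Enterprise Linux"),
   ("rocky", "Rocky Linux"),
   ("centos", "CentOS Stream"),
   ("centos-stream", "CentOS Stream"),
   ("almalinux", "AlmaLinux OS"),
   ("almalinux_kitten", "AlmaLinux OS Kitten")]

-- nice_names.get(distro_name, distro_name.title())
def pvNice (name : String) : String := pvNiceNames.getD name (pvTitle name)

-- version_key(item): int() = PySem.Int.ofStr?; any ValueError yields (0, 0)
def pvVersionKey (item : String × String) : Int × Int :=
  match PySem.Str.splitMax? item.2 "." 1 with
  | some [p0] =>
      (match PySem.Int.ofStr? p0 with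
       | some a => (a, 0)
       | none => (0, 0))
  | some [p0, p1] =>
      (match PySem.Int.ofStr? p0, PySem.Int.ofStr? p1 with
       | some a, some b => (a, b)
       | _, _ => (0, 0))
  | _ => (0, 0)  -- unreachable: sep "." is nonempty and maxsplit 1 gives at most two parts

def images_list_to_distro_families (images_list : List (String × String)) : List (String × List (String × String)) :=
  -- iterating a Python dict's keys = first occurrences of the pairs' first components
  let keys := PySem.List.dedup (images_list.map (fun p => p.1))
  let fams : PySem.Dict String (List (String × String)) :=
    keys.foldl (fun d distro =>
      match pvRsplit1 distro with
      | some (name0, version) =>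
          -- distro_families.setdefault(nice_name, []).append((distro, version))
          d.modify (pvNice name0) [] (fun l => l ++ [(distro, version)])
      | none =>
          -- except ValueError: distro_families[distro] = [(distro, "")]
          d.insert distro [(distro, "")]) PySem.Dict.empty
  let sortedFams := PySem.List.sorted2 fams.items
    (fun x => x.1 != "Red Hat Enterprise Linux") (fun x => x.1) false
  -- the final loop reassigns each (distinct) key of the sorted dict in place: a map over its items
  sortedFams.map (fun p =>
    (p.1, PySem.List.sorted2 p.2 (fun it => (pvVersionKey it).1) (fun it => (pvVersionKey it).2) true))

-- ===== PORT B =====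
def images_list_to_distro_families_alt (images_list : List (String × String)) : List (String × List (String × String)) :=
  let keys := PySem.List.dedup (images_list.map (fun p => p.1))
  let infos : List (String × String × String) :=
    keys.map (fun distro =>
      match pvRsplit1 distro with
      | some (name0, version) => (pvNice name0, distro, version)
      | none => (distro, distro, ""))
  -- infos.sort(key=lambda t: _version_key((t[1], t[2])), reverse=True): one global stable sort
  let sortedInfos := PySem.List.sorted2 infos
    (fun t => (pvVersionKey (t.2.1, t.2.2)).1) (fun t => (pvVersionKey (t.2.1, t.2.2)).2) true
  -- families.setdefault(name, []).append((distro, version))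
  let families : PySem.Dict String (List (String × String)) :=
    sortedInfos.foldl (fun d t => d.modify t.1 [] (fun l => l ++ [(t.2.1, t.2.2)])) PySem.Dict.empty
  PySem.List.sorted2 families.items
    (fun x => x.1 != "Red Hat Enterprise Linux") (fun x => x.1) false

-- ===== PRECONDITION & SPEC =====
-- coherence of an earlier key a with a later versionless key b
def pvCoh (a b : String) : Prop :=
  pvRsplit1 b = none → ((pvRsplit1 a).all fun p => pvNice p.1 != b) = true

-- Pre_ excludes lists where a versionless distro id (one without '-') occurs after another distro
-- whose computed family name equals it: there A's dict assignment accidentally discards the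
-- family entries grouped so far, an artefact of overwrite order that no caller would specify.
def Pre_images_list_to_distro_families (images_list : List (String × String)) : Prop :=
  (PySem.List.dedup (images_list.map (fun p => p.1))).Pairwise pvCoh

instance (images_list : List (String × String)) : Decidable (Pre_images_list_to_distro_families images_list) := by
  unfold Pre_images_list_to_distro_families pvCoh
  infer_instance

def pvWitness_images_list_to_distro_families : (List (String × String)) :=
  [("rhel-9.4", "x"), ("fedora-40", "y"), ("tumbleweed", "z")]

def Spec_images_list_to_distro_families (images_list : List (String × String)) (out : List (String × List (String × String))) : Prop := out = images_list_to_distro_families_alt images_list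
instance (images_list : List (String × String)) (out : List (String × List (String × String))) : Decidable (Spec_images_list_to_distro_families images_list out) := by unfold Spec_images_list_to_distro_families; infer_instance

-- ===== CLAIM (what is proved, stated in full; the proofs are below) =====
def Claim_equal_images_list_to_distro_families : Prop := ∀ (images_list : List (String × String)), Dom_images_list_to_distro_families images_list → Pre_images_list_to_distro_families images_list → Spec_images_list_to_distro_families images_list (images_list_to_distro_families images_list)

-- ===== LEMMAS AND PROOFS =====

-- family name and member entry of one distro id
def pvFam (d : String) : String :=
  match pvRsplit1 d with
  | some (n0, _) => pvNice n0
  | none => d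

def pvItem (d : String) : String × String :=
  match pvRsplit1 d with
  | some (_, v) => (d, v)
  | none => (d, "")

-- grouping skeleton, generic in the element type: name, member entry, first-occurrence
-- name list, per-name member list, and the association list they form
def gCollect {α : Type} (nm : α → String) (it : α → String × String) (ts : List α) (n : String) : List (String × String) :=
  ts.filterMap (fun t => if nm t == n then some (it t) else none)

def gNames {α : Type} (nm : α → String) (ts : List α) : List String :=
  PySem.Set.ofList (ts.map nm)

def gG {α : Type} (nm : α → String) (it : α → String × String) (ts : List α) : List (String × List (String × String)) :=
  (gNames nm ts).map (fun n => (n, gCollect nm it ts n))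

lemma gNames_append {α : Type} (nm : α → String) (ts : List α) (t : α) :
    gNames nm (ts ++ [t]) = PySem.Set.add (gNames nm ts) (nm t) := by
  simp [gNames, PySem.Set.ofList, List.foldl_append]

lemma gCollect_append {α : Type} (nm : α → String) (it : α → String × String) (ts : List α) (t : α) (n : String) :
    gCollect nm it (ts ++ [t]) n
      = gCollect nm it ts n ++ (if nm t == n then [it t] else []) := by
  simp only [gCollect, List.filterMap_append, List.filterMap]
  split <;> simp_all

lemma gCollect_nil_of_not_mem {α : Type} (nm : α → String) (it : α → String × String) (ts : List α) (n : String)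
    (h : n ∉ ts.map nm) : gCollect nm it ts n = [] := by
  rw [gCollect, List.filterMap_eq_nil_iff]
  intro t ht
  have : nm t ≠ n := fun he => h (he ▸ List.mem_map_of_mem ht)
  simp [this]

lemma gG_keys {α : Type} (nm : α → String) (it : α → String × String) (ts : List α) :
    (gG nm it ts).map Prod.fst = gNames nm ts := by
  simp [gG, List.map_map, Function.comp_def]

lemma mkgG_keys {α : Type} (nm : α → String) (it : α → String × String) (ts : List α) :
    (PySem.Dict.mk (gG nm it ts)).keys = gNames nm ts := by
  simpa [PySem.Dict.keys] using gG_keys nm it ts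

lemma mkgG_getD {α : Type} (nm : α → String) (it : α → String × String) (ts : List α) (n : String)
    (h : n ∈ gNames nm ts) :
    (PySem.Dict.mk (gG nm it ts)).getD n [] = gCollect nm it ts n := by
  have hm : (n, gCollect nm it ts n) ∈ (PySem.Dict.mk (gG nm it ts)).items :=
    List.mem_map.2 ⟨n, h, rfl⟩
  have hnd : (PySem.Dict.mk (gG nm it ts)).keys.Nodup := by
    rw [mkgG_keys nm it ts, gNames]; exact PySem.Set.nodup_ofList _
  exact PySem.Dict.getD_of_get?_eq_some _ _ (PySem.Dict.get?_of_mem_items _ hm hnd)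

-- A's grouping loop builds exactly the per-family association list, given the Pre_ coherence
lemma build_eq (ks : List String) (hnd : ks.Nodup) (hp : ks.Pairwise pvCoh) :
    (ks.foldl (fun d distro =>
      match pvRsplit1 distro with
      | some (name0, version) =>
          d.modify (pvNice name0) [] (fun l => l ++ [(distro, version)])
      | none =>
          d.insert distro [(distro, "")]) PySem.Dict.empty)
    = PySem.Dict.mk (gG pvFam pvItem ks) := by
  induction ks using List.reverseRecOn with
  | nil => rfl
  | append_singleton ks k ih =>
    obtain ⟨hnd1, -, hdisj⟩ := List.nodup_append.1 hnd
    have hk : k ∉ ks := fun hm => hdisj k hm k (List.mem_singleton_self k) rfl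
    obtain ⟨hp1, -, hcoh⟩ := List.pairwise_append.1 hp
    have hcoh : ∀ a ∈ ks, pvCoh a k := fun a ha => hcoh a ha k (List.mem_singleton_self k)
    rw [List.foldl_append, ih hnd1 hp1]
    simp only [List.foldl_cons, List.foldl_nil]
    cases hsp : pvRsplit1 k with
    | none =>
      have hfam : pvFam k = k := by simp [pvFam, hsp]
      have hitem : pvItem k = (k, "") := by simp [pvItem, hsp]
      have hnotm : k ∉ ks.map pvFam := by
        intro hm
        rcases List.mem_map.1 hm with ⟨a, ha, hfa⟩
        rcases hcase : pvRsplit1 a with - | ⟨n0, v⟩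
        · rw [pvFam, hcase] at hfa
          exact hk (hfa ▸ ha)
        · have hc := hcoh a ha hsp
          rw [hcase] at hc
          simp only [Option.all_some, bne_iff_ne, ne_eq] at hc
          rw [pvFam, hcase] at hfa
          exact hc hfa
      have hnotns : k ∉ gNames pvFam ks := fun hm => hnotm ((PySem.Set.mem_ofList _ _).1 hm)
      have hcont : (PySem.Dict.mk (gG pvFam pvItem ks)).contains k = false := by
        rw [← Bool.not_eq_true, PySem.Dict.contains_iff_mem_keys, mkgG_keys pvFam pvItem ks]
        exact hnotns
      apply PySem.Dict.ext
      rw [PySem.Dict.items_insert_of_not_contains _ _ hcont]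
      show gG pvFam pvItem ks ++ [(k, [(k, "")])] = (PySem.Dict.mk (gG pvFam pvItem (ks ++ [k]))).items
      show gG pvFam pvItem ks ++ [(k, [(k, "")])] = gG pvFam pvItem (ks ++ [k])
      have hsc : PySem.Set.contains (gNames pvFam ks) k = false := by
        rw [← Bool.not_eq_true]
        intro hc
        exact hnotns ((PySem.Set.contains_iff _ _).1 hc)
      conv_rhs => rw [gG, gNames_append, hfam, PySem.Set.add, hsc]
      simp only [Bool.false_eq_true, if_false, List.map_append, List.map_cons, List.map_nil]
      congr 1
      · apply List.map_congr_left
        intro m hm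
        have hne : pvFam k ≠ m := fun he => hnotns (hfam ▸ he ▸ hm)
        rw [gCollect_append]
        simp [hne]
      · rw [gCollect_append, gCollect_nil_of_not_mem pvFam pvItem ks k hnotm, hfam, hitem]
        simp
    | some p =>
      obtain ⟨n0, v⟩ := p
      have hfam : pvFam k = pvNice n0 := by simp [pvFam, hsp]
      have hitem : pvItem k = (k, v) := by simp [pvItem, hsp]
      simp only [PySem.Dict.modify]
      by_cases hmem : pvNice n0 ∈ gNames pvFam ks
      · have hcont : (PySem.Dict.mk (gG pvFam pvItem ks)).contains (pvNice n0) = true := by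
          rw [PySem.Dict.contains_iff_mem_keys, mkgG_keys pvFam pvItem ks]; exact hmem
        apply PySem.Dict.ext
        rw [PySem.Dict.items_insert_of_contains _ _ hcont, mkgG_getD pvFam pvItem ks _ hmem]
        show (gG pvFam pvItem ks).map _ = gG pvFam pvItem (ks ++ [k])
        have hsc : PySem.Set.contains (gNames pvFam ks) (pvNice n0) = true :=
          (PySem.Set.contains_iff _ _).2 hmem
        conv_rhs => rw [gG, gNames_append, hfam, PySem.Set.add, hsc, if_pos rfl]
        rw [gG, List.map_map]
        apply List.map_congr_left
        intro m hm
        by_cases hmn : m = pvNice n0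
        · subst hmn
          simp only [Function.comp_apply, beq_self_eq_true, if_true]
          rw [gCollect_append, hfam, hitem]
          simp
        · have : (m == pvNice n0) = false := by simp [hmn]
          simp only [Function.comp_apply, this, Bool.false_eq_true, if_false]
          rw [gCollect_append, hfam]
          have : (pvNice n0 == m) = false := by simp [Ne.symm hmn]
          simp [this]
      · have hcont : (PySem.Dict.mk (gG pvFam pvItem ks)).contains (pvNice n0) = false := by
          rw [← Bool.not_eq_true, PySem.Dict.contains_iff_mem_keys, mkgG_keys pvFam pvItem ks]
          exact hmem
        have hgd : (PySem.Dict.mk (gG pvFam pvItem ks)).getD (pvNice n0) [] = [] :=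
          PySem.Dict.getD_of_not_contains _ _ hcont
        apply PySem.Dict.ext
        rw [hgd, PySem.Dict.items_insert_of_not_contains _ _ hcont]
        show gG pvFam pvItem ks ++ [(pvNice n0, [] ++ [(k, v)])] = gG pvFam pvItem (ks ++ [k])
        have hnotm : pvNice n0 ∉ ks.map pvFam := fun hm => hmem ((PySem.Set.mem_ofList _ _).2 hm)
        have hsc : PySem.Set.contains (gNames pvFam ks) (pvNice n0) = false := by
          rw [← Bool.not_eq_true]
          intro hc
          exact hmem ((PySem.Set.contains_iff _ _).1 hc)
        conv_rhs => rw [gG, gNames_append, hfam, PySem.Set.add, hsc]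
        simp only [Bool.false_eq_true, if_false, List.map_append, List.map_cons, List.map_nil]
        congr 1
        · apply List.map_congr_left
          intro m hm
          have hne : pvFam k ≠ m := fun he => hmem (hfam ▸ he ▸ hm)
          rw [gCollect_append]
          simp [hne]
        · rw [gCollect_append, gCollect_nil_of_not_mem pvFam pvItem ks _ hnotm, hfam, hitem]
          simp

-- B's grouping loop (append-only setdefault) builds the same association list, unconditionally
lemma gGroup_eq {α : Type} (nm : α → String) (it : α → String × String) (ts : List α) :
    (ts.foldl (fun d t => d.modify (nm t) [] (fun l => l ++ [it t])) PySem.Dict.empty)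
    = PySem.Dict.mk (gG nm it ts) := by
  induction ts using List.reverseRecOn with
  | nil => rfl
  | append_singleton ts t ih =>
    rw [List.foldl_append, ih]
    simp only [List.foldl_cons, List.foldl_nil, PySem.Dict.modify]
    by_cases hmem : nm t ∈ gNames nm ts
    · have hcont : (PySem.Dict.mk (gG nm it ts)).contains (nm t) = true := by
        rw [PySem.Dict.contains_iff_mem_keys, mkgG_keys nm it ts]; exact hmem
      apply PySem.Dict.ext
      rw [PySem.Dict.items_insert_of_contains _ _ hcont, mkgG_getD nm it ts _ hmem]
      show (gG nm it ts).map _ = gG nm it (ts ++ [t])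
      have hsc : PySem.Set.contains (gNames nm ts) (nm t) = true :=
        (PySem.Set.contains_iff _ _).2 hmem
      conv_rhs => rw [gG, gNames_append, PySem.Set.add, hsc, if_pos rfl]
      rw [gG, List.map_map]
      apply List.map_congr_left
      intro m hm
      by_cases hmn : m = nm t
      · subst hmn
        simp only [Function.comp_apply, beq_self_eq_true, if_true]
        rw [gCollect_append]
        simp
      · have h1 : (m == nm t) = false := by simp [hmn]
        simp only [Function.comp_apply, h1, Bool.false_eq_true, if_false]
        rw [gCollect_append]
        have h2 : (nm t == m) = false := by simp [Ne.symm hmn]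
        simp [h2]
    · have hcont : (PySem.Dict.mk (gG nm it ts)).contains (nm t) = false := by
        rw [← Bool.not_eq_true, PySem.Dict.contains_iff_mem_keys, mkgG_keys nm it ts]
        exact hmem
      have hgd : (PySem.Dict.mk (gG nm it ts)).getD (nm t) [] = [] :=
        PySem.Dict.getD_of_not_contains _ _ hcont
      apply PySem.Dict.ext
      rw [hgd, PySem.Dict.items_insert_of_not_contains _ _ hcont]
      show gG nm it ts ++ [(nm t, [] ++ [it t])] = gG nm it (ts ++ [t])
      have hnotm : nm t ∉ ts.map nm := fun hm => hmem ((PySem.Set.mem_ofList _ _).2 hm)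
      have hsc : PySem.Set.contains (gNames nm ts) (nm t) = false := by
        rw [← Bool.not_eq_true]
        intro hc
        exact hmem ((PySem.Set.contains_iff _ _).1 hc)
      conv_rhs => rw [gG, gNames_append, PySem.Set.add, hsc]
      simp only [Bool.false_eq_true, if_false, List.map_append, List.map_cons, List.map_nil]
      congr 1
      · apply List.map_congr_left
        intro m hm
        have hne : nm t ≠ m := fun he => hmem (he ▸ hm)
        rw [gCollect_append]
        simp [hne]
      · rw [gCollect_append, gCollect_nil_of_not_mem nm it ts _ hnotm]
        simp

lemma group_eq (ts : List (String × String × String)) :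
    (ts.foldl (fun d t => d.modify t.1 [] (fun l => l ++ [(t.2.1, t.2.2)])) PySem.Dict.empty)
    = PySem.Dict.mk (gG (fun t => t.1) (fun t => (t.2.1, t.2.2)) ts) :=
  gGroup_eq (fun t => t.1) (fun t => (t.2.1, t.2.2)) ts

lemma sorted2_eq_sorted_lex {α κ₁ κ₂ : Type} [LinearOrder κ₁] [LinearOrder κ₂]
    (xs : List α) (k1 : α → κ₁) (k2 : α → κ₂) (rev : Bool) :
    PySem.List.sorted2 xs k1 k2 rev
      = PySem.List.sorted xs (fun x => toLex (k1 x, k2 x)) rev := by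
  have hcmp : (fun a b => decide (k1 a < k1 b) || (!decide (k1 b < k1 a) && decide (k2 a < k2 b)))
      = (fun a b : α => decide (toLex (k1 a, k2 a) < toLex (k1 b, k2 b))) := by
    funext a b
    rw [Bool.eq_iff_iff]
    simp only [Bool.or_eq_true, Bool.and_eq_true, Bool.not_eq_true', decide_eq_true_eq,
      decide_eq_false_iff_not, Prod.Lex.toLex_lt_toLex]
    constructor
    · rintro (h | ⟨h1, h2⟩)
      · exact Or.inl h
      · rcases lt_or_eq_of_le (not_lt.mp h1) with h' | h'
        · exact Or.inl h'
        · exact Or.inr ⟨h', h2⟩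
    · rintro (h | ⟨h1, h2⟩)
      · exact Or.inl h
      · exact Or.inr ⟨not_lt.mpr (le_of_eq h1), h2⟩
  have hcmp2 : (fun a b => decide (k1 b < k1 a) || (!decide (k1 a < k1 b) && decide (k2 b < k2 a)))
      = (fun a b : α => decide (toLex (k1 b, k2 b) < toLex (k1 a, k2 a))) := by
    funext a b
    exact congrFun (congrFun hcmp b) a
  cases rev <;> simp only [PySem.List.sorted2, PySem.List.sorted, hcmp, hcmp2, if_true]

-- a strict outer sort of an association list with distinct names is the sort of the names
lemma sorted_outer_map (l : List String) (hl : l.Nodup) (c : String → List (String × String)) :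
    PySem.List.sorted2 (l.map (fun n => (n, c n))) (fun x => x.1 != "Red Hat Enterprise Linux") (fun x => x.1) false
      = (PySem.List.sorted2 l (fun n => n != "Red Hat Enterprise Linux") (fun n => n) false).map
          (fun n => (n, c n)) := by
  rw [sorted2_eq_sorted_lex, sorted2_eq_sorted_lex]
  apply PySem.List.sorted_eq_of_perm_of_pairwise_lt
  · exact (PySem.List.sorted_perm l
      (fun n => toLex ((n != "Red Hat Enterprise Linux"), n)) false).map
      (fun n => (n, c n))
  · rw [List.pairwise_map]
    have hnd : (PySem.List.sorted l
        (fun n => toLex ((n != "Red Hat Enterprise Linux"), n)) false).Nodup := by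
      rw [(PySem.List.sorted_perm _ _ _).nodup_iff]
      exact hl
    have hle := PySem.List.sorted_pairwise l
      (fun n => toLex ((n != "Red Hat Enterprise Linux"), n))
    refine List.Pairwise.imp₂ ?_ hle hnd
    intro a b h1 h2
    refine lt_of_le_of_ne h1 ?_
    intro he
    exact h2 (congrArg (fun x => (ofLex x).2) he)

-- a stable insertion into a key-descending list commutes with a filter
lemma filter_insertBy {α κ : Type} [LinearOrder κ] (key : α → κ) (P : α → Bool) (x : α) (l : List α)
    (hl : l.Pairwise (fun a b => key b ≤ key a)) :
    (PySem.List.insertBy (fun a b => decide (key b < key a)) x l).filter P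
      = if P x then PySem.List.insertBy (fun a b => decide (key b < key a)) x (l.filter P)
        else l.filter P := by
  induction l with
  | nil => by_cases h : P x <;> simp [PySem.List.insertBy, h]
  | cons y t ih =>
    obtain ⟨hy, ht⟩ := List.pairwise_cons.1 hl
    by_cases hb : key y < key x
    · rw [show PySem.List.insertBy (fun a b => decide (key b < key a)) x (y :: t) = x :: y :: t from by
        simp [PySem.List.insertBy, hb]]
      by_cases hPy : P y
      · have h1 : PySem.List.insertBy (fun a b => decide (key b < key a)) x (y :: t.filter P)
            = x :: y :: t.filter P := by simp [PySem.List.insertBy, hb]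
        by_cases hPx : P x <;> simp [hPy, hPx, h1]
      · by_cases hPx : P x
        · have hins : PySem.List.insertBy (fun a b => decide (key b < key a)) x (t.filter P)
              = x :: t.filter P := by
            cases hft : t.filter P with
            | nil => simp [PySem.List.insertBy]
            | cons z r =>
              have hz : z ∈ t := List.mem_of_mem_filter (p := P) (by rw [hft]; exact List.mem_cons_self)
              have : key z < key x := lt_of_le_of_lt (hy z hz) hb
              simp [PySem.List.insertBy, this]
          simp [hPy, hPx, hins]
        · simp [hPy, hPx]
    · rw [show PySem.List.insertBy (fun a b => decide (key b < key a)) x (y :: t)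
          = y :: PySem.List.insertBy (fun a b => decide (key b < key a)) x t from by
        simp [PySem.List.insertBy, hb]]
      have hiht := ih ht
      by_cases hPy : P y
      · have h2 : PySem.List.insertBy (fun a b => decide (key b < key a)) x (y :: t.filter P)
            = y :: PySem.List.insertBy (fun a b => decide (key b < key a)) x (t.filter P) := by
          simp [PySem.List.insertBy, hb]
        by_cases hPx : P x <;> simp [hPy, hPx, hiht, h2]
      · by_cases hPx : P x <;> simp [hPy, hPx, hiht]

-- hence a stable reverse sort commutes with a filter
lemma filter_sorted_rev {α κ : Type} [LinearOrder κ] (xs : List α) (key : α → κ) (P : α → Bool) :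
    (PySem.List.sorted xs key true).filter P = PySem.List.sorted (xs.filter P) key true := by
  induction xs using List.reverseRecOn with
  | nil => rfl
  | append_singleton t x ih =>
    rw [PySem.List.sorted_rev_eq_foldl_insertBy, List.foldl_append, List.foldl_cons, List.foldl_nil,
      ← PySem.List.sorted_rev_eq_foldl_insertBy,
      filter_insertBy key P x _ (PySem.List.sorted_pairwise_rev t key), List.filter_append]
    by_cases hPx : P x
    · rw [if_pos hPx, ih]
      simp only [List.filter_cons, hPx, if_true, List.filter_nil]
      rw [PySem.List.sorted_rev_eq_foldl_insertBy (t.filter P ++ [x]), List.foldl_append,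
        List.foldl_cons, List.foldl_nil, ← PySem.List.sorted_rev_eq_foldl_insertBy]
    · rw [if_neg hPx, ih]
      simp [hPx]

-- a sort commutes with a map when the key is read through the map
lemma insertBy_map {α β : Type} (f : α → β) (bef : β → β → Bool) (x : α) (l : List α) :
    PySem.List.insertBy bef (f x) (l.map f)
      = (PySem.List.insertBy (fun a b => bef (f a) (f b)) x l).map f := by
  induction l with
  | nil => rfl
  | cons y t ih =>
    simp only [List.map_cons, PySem.List.insertBy]
    by_cases h : bef (f x) (f y) <;> simp [h, ih]

lemma sorted_map_eq {α β κ : Type} [LT κ] [DecidableLT κ] (xs : List α) (f : α → β) (key : β → κ) (rev : Bool) :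
    PySem.List.sorted (xs.map f) key rev = (PySem.List.sorted xs (fun a => key (f a)) rev).map f := by
  suffices h : ∀ (acc : List α) (bef : β → β → Bool),
      (xs.map f).foldl (fun acc y => PySem.List.insertBy bef y acc) (acc.map f)
        = (xs.foldl (fun acc x => PySem.List.insertBy (fun a b => bef (f a) (f b)) x acc) acc).map f by
    cases rev <;> exact h [] _
  intro acc bef
  induction xs generalizing acc with
  | nil => rfl
  | cons x t ih =>
    simp only [List.map_cons, List.foldl_cons]
    rw [insertBy_map f bef x acc, ih]

-- a guarded comprehension is a filter followed by a map
lemma filterMap_ite {α β : Type} (p : α → Bool) (g : α → β) (l : List α) :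
    l.filterMap (fun a => if p a then some (g a) else none) = (l.filter p).map g := by
  induction l with
  | nil => rfl
  | cons x t ih => by_cases h : p x <;> simp [h, ih]

lemma ofList_perm {a b : List String} (h : a.Perm b) :
    (PySem.Set.ofList a).Perm (PySem.Set.ofList b) :=
  (List.perm_ext_iff_of_nodup (PySem.Set.nodup_ofList a) (PySem.Set.nodup_ofList b)).2
    (fun x => by rw [PySem.Set.mem_ofList, PySem.Set.mem_ofList]; exact h.mem_iff)

-- ===== VERDICT (by name: the statement is the Claim_ definition above) =====
theorem images_list_to_distro_families_spec : Claim_equal_images_list_to_distro_families := by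
  intro xs _ hpre
  unfold Spec_images_list_to_distro_families
  simp only [images_list_to_distro_families, images_list_to_distro_families_alt]
  have hnd0 : (PySem.List.dedup (xs.map (fun p => p.1))).Nodup := PySem.List.nodup_dedup _
  set ks := PySem.List.dedup (xs.map (fun p => p.1)) with hks
  have hp : ks.Pairwise pvCoh := hpre
  rw [build_eq ks hnd0 hp]
  have hinfo : (ks.map (fun distro =>
      match pvRsplit1 distro with
      | some (name0, version) => (pvNice name0, distro, version)
      | none => (distro, distro, "")))
      = ks.map (fun d => (pvFam d, pvItem d)) := by
    apply List.map_congr_left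
    intro d _
    cases h : pvRsplit1 d with
    | none => simp [pvFam, pvItem, h]
    | some p => obtain ⟨a, b⟩ := p; simp [pvFam, pvItem, h]
  rw [hinfo, group_eq]
  -- A side: strict outer sort of the association list = sort of the names, mapped
  show (PySem.List.sorted2 (gG pvFam pvItem ks) _ _ false).map _ = _
  rw [show gG pvFam pvItem ks
      = (gNames pvFam ks).map (fun n => (n, gCollect pvFam pvItem ks n)) from rfl]
  rw [sorted_outer_map (gNames pvFam ks) (by rw [gNames]; exact PySem.Set.nodup_ofList _)
    (fun n => gCollect pvFam pvItem ks n)]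
  rw [List.map_map]
  -- B side likewise, over the globally sorted info list
  show _ = PySem.List.sorted2
      (gG (fun t => t.1) (fun t => (t.2.1, t.2.2))
        (PySem.List.sorted2 (ks.map (fun d => (pvFam d, pvItem d)))
          (fun t => (pvVersionKey (t.2.1, t.2.2)).1) (fun t => (pvVersionKey (t.2.1, t.2.2)).2) true)) _ _ false
  set tsS := PySem.List.sorted2 (ks.map (fun d => (pvFam d, pvItem d)))
    (fun t => (pvVersionKey (t.2.1, t.2.2)).1) (fun t => (pvVersionKey (t.2.1, t.2.2)).2) true with htsS
  rw [show gG (fun t : String × String × String => t.1) (fun t => (t.2.1, t.2.2)) tsS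
      = (gNames (fun t : String × String × String => t.1) tsS).map
          (fun n => (n, gCollect (fun t : String × String × String => t.1) (fun t => (t.2.1, t.2.2)) tsS n)) from rfl]
  rw [sorted_outer_map (gNames (fun t : String × String × String => t.1) tsS)
    (by rw [gNames]; exact PySem.Set.nodup_ofList _)
    (fun n => gCollect (fun t : String × String × String => t.1) (fun t => (t.2.1, t.2.2)) tsS n)]
  -- the two name lists are permutations with distinct entries: the strict sorts agree
  have hnames : PySem.List.sorted2 (gNames (fun t : String × String × String => t.1) tsS)
      (fun n => n != "Red Hat Enterprise Linux") (fun n => n) false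
      = PySem.List.sorted2 (gNames pvFam ks)
          (fun n => n != "Red Hat Enterprise Linux") (fun n => n) false := by
    rw [sorted2_eq_sorted_lex, sorted2_eq_sorted_lex]
    apply PySem.List.sorted_eq_sorted_of_perm
    · intro a b h
      exact congrArg (fun x => (ofLex x).2) h
    · apply ofList_perm
      have h1 : tsS.Perm (ks.map (fun d => (pvFam d, pvItem d))) := by
        rw [htsS]; exact PySem.List.sorted2_perm _ _ _ _
      have h2 := h1.map (fun t : String × String × String => t.1)
      rw [List.map_map] at h2
      exact h2
  rw [hnames]
  apply List.map_congr_left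
  intro n _
  simp only [Function.comp_apply]
  congr 1
  -- per family: the filtered global sort is the sort of the filtered members
  rw [show gCollect (fun t : String × String × String => t.1) (fun t => (t.2.1, t.2.2)) tsS n
      = tsS.filterMap (fun t => if t.1 == n then some (t.2.1, t.2.2) else none) from rfl]
  rw [filterMap_ite (fun t : String × String × String => t.1 == n) (fun t => (t.2.1, t.2.2)) tsS]
  rw [show gCollect pvFam pvItem ks n
      = ks.filterMap (fun d => if pvFam d == n then some (pvItem d) else none) from rfl]
  rw [filterMap_ite (fun d => pvFam d == n) pvItem ks, htsS]
  simp only [sorted2_eq_sorted_lex]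
  rw [filter_sorted_rev, List.filter_map, sorted_map_eq, sorted_map_eq, List.map_map]
  rfl
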